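-- pv_equiv track=rewrite | github.com/bonnemai/trainings | longest_arythmetic_subsequence.py | findLongestArithmeticProgression
-- ===== SOURCE A (Python) =====
-- def findLongestArithmeticProgression(arr, k):
--     # Write your code here
--     arr=sorted(set(arr))
--     # Maybe loop on k later
--     if len(arr)==0:
--         return 0
--     response=0
--     for i in range(k):
--         if len(arr)>i:
--             progression=[arr[i]]
--             next_elements=[a for a in arr if a>=progression[-1]+k]
--             has_next_element=len(next_elements)>0
--             while has_next_element:
--                 progression.append(next_elements[0])
--                 next_elements=[a for a in arr if a>=progression[-1]+k]
--                 has_next_element=len(next_elements)>0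
--             response=max(response, len(progression))
--     return response
-- ===== SOURCE B (Python) =====
-- def findLongestArithmeticProgression(arr, k):
--     s = sorted(set(arr))
--     if not s or k <= 0:
--         return 0
--     count = 1
--     last = s[0]
--     for x in s[1:]:
--         if x >= last + k:
--             count += 1
--             last = x
--     return count
-- ===== Notes on version B (the rewrite author's own statement) =====
-- stated objective: faster
-- what changed: A rebuilds a greedy chain from each of the first k starting points, rescanning the whole array with a list comprehension on every chain step; B makes a single linear greedy pass over sorted(set(arr)) (the chain started at the smallest element is always the longest, proved via an antitonicity lemma), dropping both the outer k-loop and the inner rescans.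
import Mathlib
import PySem

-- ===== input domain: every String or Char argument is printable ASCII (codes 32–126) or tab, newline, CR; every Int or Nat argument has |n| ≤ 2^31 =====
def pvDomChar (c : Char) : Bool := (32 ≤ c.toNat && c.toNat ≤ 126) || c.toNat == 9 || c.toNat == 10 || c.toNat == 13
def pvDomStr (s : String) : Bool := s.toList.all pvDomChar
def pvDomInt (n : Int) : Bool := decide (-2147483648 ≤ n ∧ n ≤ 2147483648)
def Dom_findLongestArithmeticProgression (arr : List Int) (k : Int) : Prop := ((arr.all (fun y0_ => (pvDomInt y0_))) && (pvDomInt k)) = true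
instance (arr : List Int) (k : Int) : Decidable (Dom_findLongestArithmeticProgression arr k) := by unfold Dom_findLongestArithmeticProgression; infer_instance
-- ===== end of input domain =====

-- ===== PORT A =====
-- B changes the algorithm: instead of restarting a quadratic greedy chain from each of the
-- first k starts, B makes ONE linear greedy pass over sorted(set(arr)) (the chain from the
-- smallest element is always longest). Objective: faster.

-- A's while loop: append the first element ≥ progression[-1]+k until none exists.
-- Fuel = s.length bounds the iterations (each pick strictly shrinks the filtered candidate
-- list when the loop is entered, i.e. when k ≥ 1); otherwise the recursion is the literal loop body.
def pvAWhile (s : List Int) (k : Int) (prog : List Int) (fuel : Nat) : List Int :=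
  match fuel with
  | 0 => prog
  | fuel + 1 =>
    -- progression[-1]; prog is nonempty at every call site, so the default is never used
    let last := (PySem.List.pyGet? prog (-1)).getD 0
    let nextElements := s.filter (fun a => decide (last + k ≤ a))
    match nextElements.head? with
    | none => prog                                   -- has_next_element is false: loop ends
    | some x => pvAWhile s k (prog ++ [x]) fuel      -- progression.append(next_elements[0])

def findLongestArithmeticProgression (arr : List Int) (k : Int) : Int :=
  let s := PySem.List.sorted (PySem.Set.ofList arr) (fun x => x) false   -- sorted(set(arr))
  if (PySem.List.len s) = 0 then 0
  else
    (PySem.List.pyRange 0 k 1).foldl (fun response i =>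
      if (PySem.List.len s) > i then
        -- progression = [arr[i]]; i satisfies 0 ≤ i < len s here, so the default is never used
        let start := (PySem.List.pyGet? s i).getD 0
        max response ((pvAWhile s k [start] s.length).length : Int)
      else response) 0

-- ===== PORT B =====
-- single greedy pass: for x in s[1:]: if x >= last + k: count += 1; last = x
def pvBLoop (rest : List Int) (k : Int) (count : Int) (last : Int) : Int :=
  match rest with
  | [] => count
  | x :: xs => if last + k ≤ x then pvBLoop xs k (count + 1) x else pvBLoop xs k count last

def findLongestArithmeticProgression_alt (arr : List Int) (k : Int) : Int :=
  let s := PySem.List.sorted (PySem.Set.ofList arr) (fun x => x) false   -- sorted(set(arr))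
  match s with
  | [] => 0
  | h :: t => if k ≤ 0 then 0 else pvBLoop t k 1 h

-- ===== PRECONDITION & SPEC =====
def Spec_findLongestArithmeticProgression (arr : List Int) (k : Int) (out : Int) : Prop := out = findLongestArithmeticProgression_alt arr k
instance (arr : List Int) (k : Int) (out : Int) : Decidable (Spec_findLongestArithmeticProgression arr k out) := by unfold Spec_findLongestArithmeticProgression; infer_instance

-- ===== CLAIM (what is proved, stated in full; the proofs are below) =====
def Claim_equal_findLongestArithmeticProgression : Prop := ∀ (arr : List Int) (k : Int), Dom_findLongestArithmeticProgression arr k → Spec_findLongestArithmeticProgression arr k (findLongestArithmeticProgression arr k)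

-- ===== LEMMAS AND PROOFS =====

-- proof-side counting twin of pvAWhile: number of picks after current last value
def pvG (s : List Int) (k : Int) (last : Int) (fuel : Nat) : Int :=
  match fuel with
  | 0 => 0
  | fuel + 1 =>
    match (s.filter (fun a => decide (last + k ≤ a))).head? with
    | none => 0
    | some x => 1 + pvG s k x fuel

theorem pvG_nonneg (s : List Int) (k last : Int) (fuel : Nat) : 0 ≤ pvG s k last fuel := by
  induction fuel generalizing last with
  | zero => simp [pvG]
  | succ f ih =>
    rw [pvG]
    cases h : (s.filter (fun a => decide (last + k ≤ a))).head? with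
    | none => simp
    | some x => simp only; have := ih x; omega

theorem pvAWhile_length (s : List Int) (k : Int) (fuel : Nat) :
    ∀ (q : List Int) (last : Int),
      ((pvAWhile s k (q ++ [last]) fuel).length : Int) = q.length + 1 + pvG s k last fuel := by
  induction fuel with
  | zero => intro q last; simp [pvAWhile, pvG]
  | succ f ih =>
    intro q last
    rw [pvAWhile, pvG]
    simp only [PySem.List.pyGet?_neg_one_append_singleton, Option.getD_some]
    cases h : (s.filter (fun a => decide (last + k ≤ a))).head? with
    | none => simp
    | some x =>
      simp only
      have := ih (q ++ [last]) x
      simp only [List.append_assoc, List.singleton_append] at this ⊢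
      rw [this]
      simp [List.length_append]
      omega

-- greedy chain length is antitone in the last value, on a ≤-sorted list
theorem pvG_antitone (s : List Int) (k : Int) (hs : s.Pairwise (· ≤ ·)) (fuel : Nat) :
    ∀ t t' : Int, t ≤ t' → pvG s k t' fuel ≤ pvG s k t fuel := by
  induction fuel with
  | zero => intro t t' _; simp [pvG]
  | succ f ih =>
    intro t t' htt
    rw [pvG, pvG]
    cases h' : (s.filter (fun a => decide (t' + k ≤ a))).head? with
    | none =>
      cases h : (s.filter (fun a => decide (t + k ≤ a))).head? with
      | none => simp
      | some x => simp only; have := pvG_nonneg s k x f; omega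
    | some x' =>
      -- x' is in s and satisfies t + k ≤ x', so the t-filter is nonempty
      have hx'mem : x' ∈ s.filter (fun a => decide (t' + k ≤ a)) := List.mem_of_mem_head? (by simp [h'])
      have hx's : x' ∈ s := (List.mem_filter.mp hx'mem).1
      have hx'ge : t' + k ≤ x' := by have := (List.mem_filter.mp hx'mem).2; simpa using this
      have hx'ge2 : t + k ≤ x' := by omega
      have hne : s.filter (fun a => decide (t + k ≤ a)) ≠ [] := by
        intro hnil
        have : x' ∈ s.filter (fun a => decide (t + k ≤ a)) := List.mem_filter.mpr ⟨hx's, by simpa⟩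
        simp [hnil] at this
      obtain ⟨x, tl, hx⟩ := List.exists_cons_of_ne_nil hne
      have hxh : (s.filter (fun a => decide (t + k ≤ a))).head? = some x := by simp [hx]
      rw [hxh]
      simp only
      -- x ≤ x' since the filtered list inherits sortedness and x' is a member
      have hpair : (s.filter (fun a => decide (t + k ≤ a))).Pairwise (· ≤ ·) := hs.filter _
      have hx'in : x' ∈ s.filter (fun a => decide (t + k ≤ a)) :=
        List.mem_filter.mpr ⟨hx's, by simpa⟩
      have hxle : x ≤ x' := by
        rw [hx] at hx'in hpair
        rcases List.mem_cons.mp hx'in with heq | hx'tl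
        · omega
        · exact (List.pairwise_cons.mp hpair).1 x' hx'tl
      have := ih x x' hxle
      omega

theorem pvBLoop_acc (rest : List Int) (k : Int) :
    ∀ c last, pvBLoop rest k c last = c + pvBLoop rest k 0 last := by
  induction rest with
  | nil => intro c last; simp [pvBLoop]
  | cons x xs ih =>
    intro c last
    simp only [pvBLoop]
    by_cases h : last + k ≤ x
    · simp only [if_pos h]; rw [ih (c + 1), ih (0 + 1)]; omega
    · simp only [if_neg h]; exact ih c last

-- the single pass computes exactly the filter-head greedy count
theorem pvG_eq_pvBLoop (k : Int) (hk : 1 ≤ k) :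
    ∀ (rest pre : List Int) (last : Int) (fuel : Nat),
      (∀ a ∈ pre, a < last + k) → rest.length ≤ fuel →
      pvG (pre ++ rest) k last fuel = pvBLoop rest k 0 last := by
  intro rest
  induction rest with
  | nil =>
    intro pre last fuel hpre _
    cases fuel with
    | zero => simp [pvG, pvBLoop]
    | succ f =>
      have hf : ((pre ++ ([] : List Int)).filter (fun a => decide (last + k ≤ a))).head? = none := by
        have : (pre ++ ([] : List Int)).filter (fun a => decide (last + k ≤ a)) = [] := by
          rw [List.filter_eq_nil_iff]
          intro a ha
          simp only [List.append_nil] at ha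
          simpa using not_le.mpr (hpre a ha)
        rw [this]; rfl
      rw [pvG, hf]
      simp [pvBLoop]
  | cons x xs ih =>
    intro pre last fuel hpre hlen
    by_cases hx : last + k ≤ x
    · -- pick x
      cases fuel with
      | zero => simp at hlen
      | succ f =>
        have hfpre : pre.filter (fun a => decide (last + k ≤ a)) = [] := by
          rw [List.filter_eq_nil_iff]
          intro a ha
          simpa using not_le.mpr (hpre a ha)
        have hfilter :
            (pre ++ x :: xs).filter (fun a => decide (last + k ≤ a))
              = x :: xs.filter (fun a => decide (last + k ≤ a)) := by
          rw [List.filter_append, hfpre, List.nil_append, List.filter_cons_of_pos (by simpa using hx)]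
        simp only [pvG, hfilter, List.head?_cons]
        have hpre' : ∀ a ∈ pre ++ [x], a < x + k := by
          intro a ha
          rcases List.mem_append.mp ha with h | h
          · have := hpre a h; omega
          · simp at h; omega
        have := ih (pre ++ [x]) x f hpre' (by simp at hlen ⊢; omega)
        rw [List.append_assoc] at this
        simp only [List.singleton_append] at this
        rw [this]
        simp only [pvBLoop, if_pos hx]
        rw [pvBLoop_acc xs k (0 + 1) x]
        omega
    · -- skip x
      have hpre' : ∀ a ∈ pre ++ [x], a < last + k := by
        intro a ha
        rcases List.mem_append.mp ha with h | h
        · exact hpre a h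
        · simp at h; omega
      have := ih (pre ++ [x]) last fuel hpre' (by simp at hlen ⊢; omega)
      rw [List.append_assoc] at this
      simp only [List.singleton_append] at this
      rw [this]
      simp [pvBLoop, if_neg hx]

-- the fold of A's outer loop is bounded by V and reaches V at i = 0
theorem pvFold_le (step : Int → Int → Int) (V : Int) :
    ∀ (l : List Int), (∀ acc i, i ∈ l → acc ≤ V → step acc i ≤ V) →
      ∀ acc : Int, acc ≤ V → l.foldl step acc ≤ V := by
  intro l
  induction l with
  | nil => intro _ acc h; simpa
  | cons x xs ih =>
    intro hstep acc h
    exact ih (fun acc i hi => hstep acc i (List.mem_cons_of_mem _ hi)) _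
      (hstep acc x List.mem_cons_self h)

theorem pvFold_ge (step : Int → Int → Int)
    (hmono : ∀ acc i, acc ≤ step acc i) :
    ∀ (l : List Int) (acc : Int), acc ≤ l.foldl step acc := by
  intro l
  induction l with
  | nil => intro acc; simp
  | cons x xs ih => intro acc; exact le_trans (hmono acc x) (ih (step acc x))

theorem pvFold_mem_ge (step : Int → Int → Int)
    (hmono : ∀ acc i, acc ≤ step acc i) (i₀ : Int) (V : Int)
    (hV : ∀ acc, V ≤ step acc i₀) :
    ∀ (l : List Int) (acc : Int), i₀ ∈ l → V ≤ l.foldl step acc := by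
  intro l
  induction l with
  | nil => intro acc h; simp at h
  | cons x xs ih =>
    intro acc hmem
    rcases List.mem_cons.mp hmem with rfl | h
    · exact le_trans (hV acc) (pvFold_ge step hmono xs _)
    · exact ih _ h

-- the body of B after the shared sorted(set(·)) step (proof-side abbreviation, definitionally equal)
def pvAltBody (s : List Int) (k : Int) : Int :=
  match s with
  | [] => 0
  | h :: t => if k ≤ 0 then 0 else pvBLoop t k 1 h

-- the whole equality, stated over an arbitrary ≤-sorted list (both ports after the shared sorted(set(·)) step)
theorem pvMain (s : List Int) (k : Int) (hsle : s.Pairwise (· ≤ ·)) :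
    (if (s.length : Int) = 0 then 0
     else (PySem.List.pyRange 0 k 1).foldl (fun response i =>
       if (s.length : Int) > i then
         max response ((pvAWhile s k [(PySem.List.pyGet? s i).getD 0] s.length).length : Int)
       else response) 0)
    = pvAltBody s k := by
  cases s with
  | nil => simp [pvAltBody]
  | cons h t =>
    rw [if_neg (by simp; omega)]
    simp only [pvAltBody]
    by_cases hk : k ≤ 0
    · rw [if_pos hk, PySem.List.pyRange_one_eq_nil (by omega), List.foldl_nil]
    · rw [if_neg hk]
      have hk1 : 1 ≤ k := by omega
      have hsorted := hsle
      -- B's value = 1 + greedy pick count from h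
      have hcorr : pvG (h :: t) k h (h :: t).length = pvBLoop t k 0 h := by
        have := pvG_eq_pvBLoop k hk1 t [h] h (h :: t).length
          (by intro a ha; simp at ha; omega) (by simp)
        simpa using this
      have hB : pvBLoop t k 1 h = 1 + pvG (h :: t) k h (h :: t).length := by
        rw [pvBLoop_acc, hcorr]
      rw [hB]
      set s := h :: t with hs
      set V : Int := 1 + pvG s k h s.length with hV
      set step : Int → Int → Int := fun response i =>
        if (s.length : Int) > i then
          max response ((pvAWhile s k [(PySem.List.pyGet? s i).getD 0] s.length).length : Int)
        else response with hstep
      -- every chain that A tries is at most as long as the chain from h (the minimum)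
      have hchain : ∀ i : Int, 0 ≤ i → i < (s.length : Int) →
          ((pvAWhile s k [(PySem.List.pyGet? s i).getD 0] s.length).length : Int) ≤ V := by
        intro i hi0 hilt
        have hint : i.toNat < s.length := by omega
        have hget : PySem.List.pyGet? s i = some (s[i.toNat]'hint) :=
          PySem.List.pyGet?_eq_some_getElem s hi0 (by simpa using hilt)
        rw [hget, Option.getD_some]
        have hlen := pvAWhile_length s k s.length [] (s[i.toNat]'hint)
        simp only [List.nil_append, List.length_nil] at hlen
        rw [hlen]
        have hmem : s[i.toNat]'hint ∈ s := List.getElem_mem _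
        have hhead : h ≤ s[i.toNat]'hint := by
          have hmem2 : s[i.toNat]'hint ∈ h :: t := hmem
          rcases List.mem_cons.mp hmem2 with heq | hmem3
          · omega
          · exact (List.pairwise_cons.mp (show (h :: t).Pairwise (· ≤ ·) from hsle)).1 _ hmem3
        have := pvG_antitone s k hsle s.length h (s[i.toNat]'hint) hhead
        omega
      have hub : ∀ acc i, i ∈ PySem.List.pyRange 0 k 1 → acc ≤ V → step acc i ≤ V := by
        intro acc i hi hacc
        have hi0 : 0 ≤ i := (PySem.List.mem_pyRange_one.mp hi).1
        simp only [hstep]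
        split_ifs with hcond
        · exact max_le hacc (hchain i hi0 hcond)
        · exact hacc
      have hmono : ∀ acc i, acc ≤ step acc i := by
        intro acc i
        simp only [hstep]
        split_ifs
        · exact le_max_left _ _
        · exact le_refl _
      have hzero_mem : (0 : Int) ∈ PySem.List.pyRange 0 k 1 := by
        rw [PySem.List.mem_pyRange_one]; omega
      have hV0 : ∀ acc, V ≤ step acc 0 := by
        intro acc
        simp only [hstep]
        rw [if_pos (by rw [hs]; simp)]
        have hget : PySem.List.pyGet? s 0 = some h := by
          rw [hs]; exact PySem.List.pyGet?_zero_cons h t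
        rw [hget, Option.getD_some]
        have hlen := pvAWhile_length s k s.length [] h
        simp only [List.nil_append, List.length_nil] at hlen
        rw [hlen]
        simp only [hV]
        omega
      have hle : (PySem.List.pyRange 0 k 1).foldl step 0 ≤ V :=
        pvFold_le step V (PySem.List.pyRange 0 k 1) hub 0 (by simp only [hV]; have := pvG_nonneg s k h s.length; omega)
      have hge : V ≤ (PySem.List.pyRange 0 k 1).foldl step 0 :=
        pvFold_mem_ge step hmono 0 V hV0 _ 0 hzero_mem
      omega

-- ===== VERDICT (by name: the statement is the Claim_ definition above) =====
theorem findLongestArithmeticProgression_spec : Claim_equal_findLongestArithmeticProgression := by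
  intro arr k _
  unfold Spec_findLongestArithmeticProgression
  unfold findLongestArithmeticProgression findLongestArithmeticProgression_alt
  simp only [PySem.List.len_eq]
  exact pvMain _ k ((PySem.List.sorted_ofList_pairwise_lt arr).imp le_of_lt)
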